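-- pv_equiv track=rewrite | github.com/askft/thesis-code | bilstm/bilstm.py | sentence_metrics
-- ===== SOURCE A (Python) =====
-- from collections import defaultdict, Counter
-- from typing import DefaultDict, List, Counter as CounterT
-- from collections import defaultdict
--
-- def  get_indices(labels):
--     indices = list()
--     start = 0
--     counter = 0
--     in_entity = False
--
--     for label in labels:
--         counter += 1
--
--         if in_entity:
--             if label == "O":
--                 indices.append((start, counter - 1))
--                 in_entity = False
--
--             elif label == "B":
--                 indices.append((start, start))
--                 start = counter
--
--         elif label == "B":
--             start = counter
--             in_entity = True
--
--     return indices
--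
-- def sentence_metrics(pred_labels: List[str], gs_labels: List[str]):
--
--     # Treating B = I
--     confusion_matrix = defaultdict(int)
--     for pred, gs in zip(pred_labels, gs_labels):
--
--         if pred == "B" or pred == "I":
--             if gs == "B" or gs == "I":
--                 confusion_matrix["true_positive"] += 1
--             elif gs == "O":
--                 confusion_matrix["false_positive"] += 1
--         elif pred == "O":
--             if gs == "O":
--                 confusion_matrix["true_negative"] += 1
--             elif gs == "B" or gs == "I":
--                 confusion_matrix["false_negative"] += 1
--
--     # Treating B=/=I
--     token_matrix = defaultdict(lambda: defaultdict(int))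
--
--     for pred, gs in zip(pred_labels, gs_labels):
--         token_matrix[gs][pred] += 1
--
--     # Entity Level Perfect. Naive way of taking the metrics
--     entity_matrix = defaultdict(int)
--     pred_indices = get_indices(pred_labels)
--     gs_indices = get_indices(gs_labels)
--
--     while pred_indices and gs_indices:
--         pred = pred_indices.pop(0)
--         gs = gs_indices.pop(0)
--
--         pred_set = set(range(pred[0], pred[1] + 1 ))
--         gs_set = set(range(gs[0], gs[1] + 1 ))
--
--         if pred_set & gs_set:
--             if not pred_set.symmetric_difference(gs_set):
--                 entity_matrix["true_positive"] += 1
--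
--             # there is some overlap so the entity has been mispredicted
--             # there are no strict rules for this, but it should make some sense
--             elif not pred[0] in gs_set:
--                 entity_matrix["false_positive"] += 1
--
--             #else:
--                 #entity_matrix["false_negative"] += 1
--
--         # one tuple will have to be returned to its list
--         else:
--             if pred[0] > gs[0]:
--                 entity_matrix["false_negative"] += 1
--                 pred_indices.insert(0, pred)
--
--             else:
--                 entity_matrix["false_positive"] += 1
--                 gs_indices.insert(0, gs)
--
--     entity_matrix["false_positive"] += len(pred_indices)
--     entity_matrix["false_negative"] += len(gs_indices)
--     entity_matrix["true_negative"] = confusion_matrix["true_negative"]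
--
--     return confusion_matrix, token_matrix, entity_matrix
-- ===== SOURCE B (Python) =====
-- def get_indices(labels):
--     # unchanged helper: interval extraction is already a single linear pass
--     indices = list()
--     start = 0
--     counter = 0
--     in_entity = False
--
--     for label in labels:
--         counter += 1
--
--         if in_entity:
--             if label == "O":
--                 indices.append((start, counter - 1))
--                 in_entity = False
--
--             elif label == "B":
--                 indices.append((start, start))
--                 start = counter
--
--         elif label == "B":
--             start = counter
--             in_entity = True
--
--     return indices
--
--
-- def _bump(d, k, amt=1):
--     d[k] = d.get(k, 0) + amt
--
--
-- def sentence_metrics(pred_labels, gs_labels):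
--     # one fused pass for both token-level matrices, plain dicts
--     confusion = {}
--     token = {}
--     for pred, gs in zip(pred_labels, gs_labels):
--         if pred == "B" or pred == "I":
--             if gs == "B" or gs == "I":
--                 _bump(confusion, "true_positive")
--             elif gs == "O":
--                 _bump(confusion, "false_positive")
--         elif pred == "O":
--             if gs == "O":
--                 _bump(confusion, "true_negative")
--             elif gs == "B" or gs == "I":
--                 _bump(confusion, "false_negative")
--         inner = token.setdefault(gs, {})
--         inner[pred] = inner.get(pred, 0) + 1
--
--     # two-pointer merge over the (sorted, disjoint) interval lists:
--     # integer comparisons instead of pop(0)/insert(0) and set algebra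
--     P = get_indices(pred_labels)
--     G = get_indices(gs_labels)
--     entity = {}
--     i = j = 0
--     while i < len(P) and j < len(G):
--         p, g = P[i], G[j]
--         if max(p[0], g[0]) <= min(p[1], g[1]):   # intervals overlap
--             if p == g:
--                 _bump(entity, "true_positive")
--             elif p[0] < g[0]:
--                 _bump(entity, "false_positive")
--             i += 1
--             j += 1
--         elif p[0] > g[0]:
--             _bump(entity, "false_negative")
--             j += 1
--         else:
--             _bump(entity, "false_positive")
--             i += 1
--     _bump(entity, "false_positive", len(P) - i)
--     _bump(entity, "false_negative", len(G) - j)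
--     entity["true_negative"] = confusion.setdefault("true_negative", 0)
--
--     return confusion, token, entity
-- ===== Notes on version B (the rewrite author's own statement) =====
-- stated objective: faster
-- what changed: The entity-level while loop (pop(0)/insert(0) list shifting plus building a set of positions per interval pair) is replaced by a two-pointer merge over the two interval lists using only integer comparisons, and the two token-level zip passes are fused into a single pass over plain dicts; the linear get_indices helper is kept unchanged.
import Mathlib
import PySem

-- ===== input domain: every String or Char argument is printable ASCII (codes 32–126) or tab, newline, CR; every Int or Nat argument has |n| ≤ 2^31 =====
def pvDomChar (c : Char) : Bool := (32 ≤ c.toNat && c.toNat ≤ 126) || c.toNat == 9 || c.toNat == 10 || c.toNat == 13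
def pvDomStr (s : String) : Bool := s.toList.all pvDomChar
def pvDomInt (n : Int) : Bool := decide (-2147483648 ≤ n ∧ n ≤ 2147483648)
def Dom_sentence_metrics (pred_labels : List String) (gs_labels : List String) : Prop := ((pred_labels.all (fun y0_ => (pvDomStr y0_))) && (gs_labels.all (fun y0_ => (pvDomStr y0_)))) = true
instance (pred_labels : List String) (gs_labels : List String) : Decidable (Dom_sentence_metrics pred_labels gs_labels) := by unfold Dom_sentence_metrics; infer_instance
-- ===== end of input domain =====

-- B replaces A's entity loop (pop(0)/insert(0) plus set algebra per pair) by a two-pointer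
-- merge with integer interval comparisons, and fuses A's two token-level passes into one.

-- ===== PORT A =====

-- get_indices: shared helper — Source B keeps this function verbatim, so both ports call it
def giStep (st : List (Int × Int) × Int × Int × Bool) (label : String) : List (Int × Int) × Int × Int × Bool :=
  let indices := st.1
  let start := st.2.1
  let counter := st.2.2.1 + 1
  let in_entity := st.2.2.2
  if in_entity then
    if label = "O" then (indices ++ [(start, counter - 1)], start, counter, false)
    else if label = "B" then (indices ++ [(start, start)], counter, counter, true)
    else (indices, start, counter, in_entity)
  else if label = "B" then (indices, counter, counter, true)
  else (indices, start, counter, in_entity)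

def getIndicesPy (labels : List String) : List (Int × Int) :=
  (labels.foldl giStep ([], 0, 0, false)).1

-- A's confusion-matrix loop body (defaultdict(int): d[k] += 1 is Dict.modify k 0 (· + 1))
def confStepA (cm : PySem.Dict String Int) (pg : String × String) : PySem.Dict String Int :=
  if pg.1 = "B" ∨ pg.1 = "I" then
    if pg.2 = "B" ∨ pg.2 = "I" then cm.modify "true_positive" 0 (· + 1)
    else if pg.2 = "O" then cm.modify "false_positive" 0 (· + 1)
    else cm
  else if pg.1 = "O" then
    if pg.2 = "O" then cm.modify "true_negative" 0 (· + 1)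
    else if pg.2 = "B" ∨ pg.2 = "I" then cm.modify "false_negative" 0 (· + 1)
    else cm
  else cm

-- A's token-matrix loop body: token_matrix[gs][pred] += 1 on a defaultdict of defaultdicts
def tokStepA (tm : PySem.Dict String (PySem.Dict String Int)) (pg : String × String) :
    PySem.Dict String (PySem.Dict String Int) :=
  tm.modify pg.2 PySem.Dict.empty (fun inner => inner.modify pg.1 0 (· + 1))

-- A's while loop: pop both heads; on disjoint intervals re-insert one at the front.
-- Returns the final entity matrix and the two remaining lists (A takes their len after the loop).
-- The fuel argument is only a structural-termination guard: each iteration consumes at least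
-- one element overall, so fuel = |ps| + |gs| always suffices and the 0-fuel case is unreachable.
def entLoopA : Nat → PySem.Dict String Int → List (Int × Int) → List (Int × Int) →
    PySem.Dict String Int × List (Int × Int) × List (Int × Int)
  | _, em, [], gs => (em, [], gs)
  | _, em, p :: ps, [] => (em, p :: ps, [])
  | 0, em, ps, gs => (em, ps, gs)
  | fuel + 1, em, p :: ps, g :: gs =>
    let pred_set := PySem.Set.ofList (PySem.List.pyRange p.1 (p.2 + 1) 1)
    let gs_set := PySem.Set.ofList (PySem.List.pyRange g.1 (g.2 + 1) 1)
    if PySem.Set.inter pred_set gs_set ≠ [] then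
      if PySem.Set.symmDiff pred_set gs_set = [] then
        entLoopA fuel (PySem.Dict.modify em "true_positive" 0 (· + 1)) ps gs
      else if PySem.Set.contains gs_set p.1 = false then
        entLoopA fuel (PySem.Dict.modify em "false_positive" 0 (· + 1)) ps gs
      else entLoopA fuel em ps gs
    else if p.1 > g.1 then
      entLoopA fuel (PySem.Dict.modify em "false_negative" 0 (· + 1)) (p :: ps) gs
    else
      entLoopA fuel (PySem.Dict.modify em "false_positive" 0 (· + 1)) ps (g :: gs)

def sentence_metrics (pred_labels : List String) (gs_labels : List String) :
    (List (String × Int)) × (List (String × List (String × Int))) × (List (String × Int)) :=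
  let confusion := (pred_labels.zip gs_labels).foldl confStepA PySem.Dict.empty
  let token := (pred_labels.zip gs_labels).foldl tokStepA PySem.Dict.empty
  let pred_indices := getIndicesPy pred_labels
  let gs_indices := getIndicesPy gs_labels
  let r := entLoopA (pred_indices.length + gs_indices.length) PySem.Dict.empty pred_indices gs_indices
  let entity := PySem.Dict.modify r.1 "false_positive" 0 (· + (r.2.1.length : Int))
  let entity := PySem.Dict.modify entity "false_negative" 0 (· + (r.2.2.length : Int))
  -- reading confusion_matrix["true_negative"] on a defaultdict inserts the key: setdefault
  let confusion := confusion.setdefault "true_negative" 0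
  let entity := entity.insert "true_negative" (confusion.getD "true_negative" 0)
  (confusion.items, token.items.map (fun kv => (kv.1, kv.2.items)), entity.items)

-- ===== PORT B =====

-- _bump(d, k, amt): d[k] = d.get(k, 0) + amt
def bumpB (d : PySem.Dict String Int) (k : String) (amt : Int) : PySem.Dict String Int :=
  d.insert k (d.getD k 0 + amt)

def confStepB (confusion : PySem.Dict String Int) (pg : String × String) : PySem.Dict String Int :=
  if pg.1 = "B" ∨ pg.1 = "I" then
    if pg.2 = "B" ∨ pg.2 = "I" then bumpB confusion "true_positive" 1
    else if pg.2 = "O" then bumpB confusion "false_positive" 1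
    else confusion
  else if pg.1 = "O" then
    if pg.2 = "O" then bumpB confusion "true_negative" 1
    else if pg.2 = "B" ∨ pg.2 = "I" then bumpB confusion "false_negative" 1
    else confusion
  else confusion

-- inner = token.setdefault(gs, {}); inner[pred] = inner.get(pred, 0) + 1
def tokStepB (token : PySem.Dict String (PySem.Dict String Int)) (pg : String × String) :
    PySem.Dict String (PySem.Dict String Int) :=
  token.insert pg.2 (bumpB (token.getD pg.2 PySem.Dict.empty) pg.1 1)

-- B's two-pointer entity loop: indices i, j into the two interval lists, integer comparisons
-- only. The fuel argument is only a structural-termination guard (one of i, j grows each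
-- iteration, so fuel = |P| + |G| always suffices and the 0-fuel case is unreachable).
def entGoB (P G : List (Int × Int)) : Nat → PySem.Dict String Int → Nat → Nat →
    PySem.Dict String Int × Nat × Nat
  | 0, em, i, j => (em, i, j)
  | fuel + 1, em, i, j =>
    if hi : i < P.length then
      if hj : j < G.length then
        let p := P[i]
        let g := G[j]
        if max p.1 g.1 ≤ min p.2 g.2 then
          if p = g then entGoB P G fuel (bumpB em "true_positive" 1) (i + 1) (j + 1)
          else if p.1 < g.1 then entGoB P G fuel (bumpB em "false_positive" 1) (i + 1) (j + 1)
          else entGoB P G fuel em (i + 1) (j + 1)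
        else if p.1 > g.1 then entGoB P G fuel (bumpB em "false_negative" 1) i (j + 1)
        else entGoB P G fuel (bumpB em "false_positive" 1) (i + 1) j
      else (em, i, j)
    else (em, i, j)

def sentence_metrics_alt (pred_labels : List String) (gs_labels : List String) :
    (List (String × Int)) × (List (String × List (String × Int))) × (List (String × Int)) :=
  let st := (pred_labels.zip gs_labels).foldl
    (fun s e => (confStepB s.1 e, tokStepB s.2 e)) (PySem.Dict.empty, PySem.Dict.empty)
  let confusion := st.1
  let token := st.2
  let P := getIndicesPy pred_labels
  let G := getIndicesPy gs_labels
  let r := entGoB P G (P.length + G.length) PySem.Dict.empty 0 0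
  let entity := bumpB r.1 "false_positive" ((P.length - r.2.1 : Nat) : Int)
  let entity := bumpB entity "false_negative" ((G.length - r.2.2 : Nat) : Int)
  let confusion := confusion.setdefault "true_negative" 0
  let entity := entity.insert "true_negative" (confusion.getD "true_negative" 0)
  (confusion.items, token.items.map (fun kv => (kv.1, kv.2.items)), entity.items)

-- ===== PRECONDITION & SPEC =====
def Spec_sentence_metrics (pred_labels : List String) (gs_labels : List String) (out : (List (String × Int)) × (List (String × List (String × Int))) × (List (String × Int))) : Prop := out = sentence_metrics_alt pred_labels gs_labels
instance (pred_labels : List String) (gs_labels : List String) (out : (List (String × Int)) × (List (String × List (String × Int))) × (List (String × Int))) : Decidable (Spec_sentence_metrics pred_labels gs_labels out) := by unfold Spec_sentence_metrics; infer_instance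

-- ===== CLAIM (what is proved, stated in full; the proofs are below) =====
def Claim_equal_sentence_metrics : Prop := ∀ (pred_labels : List String) (gs_labels : List String), Dom_sentence_metrics pred_labels gs_labels → Spec_sentence_metrics pred_labels gs_labels (sentence_metrics pred_labels gs_labels)

-- ===== LEMMAS AND PROOFS =====

-- Python's 'pred_set & gs_set' is truthy iff the two closed intervals overlap
lemma interNe_iff (p g : Int × Int) :
    PySem.Set.inter (PySem.Set.ofList (PySem.List.pyRange p.1 (p.2 + 1) 1))
      (PySem.Set.ofList (PySem.List.pyRange g.1 (g.2 + 1) 1)) ≠ [] ↔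
    max p.1 g.1 ≤ min p.2 g.2 := by
  rw [Ne, PySem.Set.inter, List.filter_eq_nil_iff]
  simp [PySem.Set.contains, PySem.Set.mem_ofList, PySem.List.mem_pyRange_one]
  constructor
  · rintro ⟨x, hx⟩; omega
  · intro h; refine ⟨max p.1 g.1, ?_⟩; omega

-- under overlap, empty symmetric difference is exactly tuple equality
lemma symmDiff_iff (p g : Int × Int) (hov : max p.1 g.1 ≤ min p.2 g.2) :
    PySem.Set.symmDiff (PySem.Set.ofList (PySem.List.pyRange p.1 (p.2 + 1) 1))
      (PySem.Set.ofList (PySem.List.pyRange g.1 (g.2 + 1) 1)) = [] ↔ p = g := by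
  rw [PySem.Set.symmDiff, List.append_eq_nil_iff, PySem.Set.diff, PySem.Set.diff,
    List.filter_eq_nil_iff, List.filter_eq_nil_iff]
  simp [PySem.Set.contains, PySem.Set.mem_ofList, PySem.List.mem_pyRange_one]
  constructor
  · rintro ⟨h1, h2⟩
    have e1 := h1 p.1 le_rfl (by omega)
    have e2 := h1 p.2 (by omega) le_rfl
    have e3 := h2 g.1 le_rfl (by omega)
    have e4 := h2 g.2 (by omega) le_rfl
    rw [Prod.ext_iff]
    constructor <;> omega
  · rintro rfl
    exact ⟨fun a h1 h2 => ⟨h1, h2⟩, fun a h1 h2 => ⟨h1, h2⟩⟩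

-- under overlap, 'pred[0] not in gs_set' is exactly pred[0] < gs[0]
lemma contains_iff (p g : Int × Int) (hov : max p.1 g.1 ≤ min p.2 g.2) :
    PySem.Set.contains (PySem.Set.ofList (PySem.List.pyRange g.1 (g.2 + 1) 1)) p.1 = false ↔
    p.1 < g.1 := by
  rw [Bool.eq_false_iff, Ne, PySem.Set.contains, List.contains_iff_mem, PySem.Set.mem_ofList,
    PySem.List.mem_pyRange_one]
  omega

lemma entLoopA_nil_left (fuel : Nat) (em : PySem.Dict String Int) (gs : List (Int × Int)) :
    entLoopA fuel em [] gs = (em, [], gs) := by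
  cases fuel <;> simp [entLoopA]

lemma entLoopA_nil_right (fuel : Nat) (em : PySem.Dict String Int) (ps : List (Int × Int)) :
    entLoopA fuel em ps [] = (em, ps, []) := by
  cases fuel <;> cases ps <;> simp [entLoopA]

-- A's list-mutating loop agrees with B's two-pointer loop on suffixes (any sufficient fuel)
lemma entAgree (P G : List (Int × Int)) :
    ∀ fuel i j em, P.length - i + (G.length - j) ≤ fuel →
    entLoopA fuel em (P.drop i) (G.drop j) =
      ((entGoB P G fuel em i j).1, P.drop (entGoB P G fuel em i j).2.1,
        G.drop (entGoB P G fuel em i j).2.2) := by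
  intro fuel
  induction fuel with
  | zero =>
    intro i j em h
    have hp : P.drop i = [] := List.drop_eq_nil_of_le (by omega)
    rw [hp, entGoB, entLoopA_nil_left, hp]
  | succ n ih =>
    intro i j em h
    by_cases hi : i < P.length
    · by_cases hj : j < G.length
      · rw [List.drop_eq_getElem_cons hi, List.drop_eq_getElem_cons hj, entGoB]
        simp only [dif_pos hi, dif_pos hj, entLoopA]
        by_cases hov : max P[i].1 G[j].1 ≤ min P[i].2 G[j].2
        · rw [if_pos ((interNe_iff P[i] G[j]).mpr hov), if_pos hov]
          by_cases heq : P[i] = G[j]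
          · rw [if_pos ((symmDiff_iff P[i] G[j] hov).mpr heq), if_pos heq]
            exact ih (i + 1) (j + 1) _ (by omega)
          · rw [if_neg (fun hc => heq ((symmDiff_iff P[i] G[j] hov).mp hc)), if_neg heq]
            by_cases hlt : P[i].1 < G[j].1
            · rw [if_pos ((contains_iff P[i] G[j] hov).mpr hlt), if_pos hlt]
              exact ih (i + 1) (j + 1) _ (by omega)
            · rw [if_neg (fun hc => hlt ((contains_iff P[i] G[j] hov).mp hc)), if_neg hlt]
              exact ih (i + 1) (j + 1) _ (by omega)
        · have hne : ¬ PySem.Set.inter (PySem.Set.ofList (PySem.List.pyRange P[i].1 (P[i].2 + 1) 1))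
              (PySem.Set.ofList (PySem.List.pyRange G[j].1 (G[j].2 + 1) 1)) ≠ [] :=
            fun hc => hov ((interNe_iff P[i] G[j]).mp hc)
          rw [if_neg hne, if_neg hov]
          by_cases hgt : P[i].1 > G[j].1
          · rw [if_pos hgt, if_pos hgt]
            have := ih i (j + 1) (bumpB em "false_negative" 1) (by omega)
            rw [List.drop_eq_getElem_cons hi] at this
            exact this
          · rw [if_neg hgt, if_neg hgt]
            have := ih (i + 1) j (bumpB em "false_positive" 1) (by omega)
            rw [List.drop_eq_getElem_cons hj] at this
            exact this
      · have hg : G.drop j = [] := List.drop_eq_nil_of_le (by omega)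
        rw [hg, entGoB, entLoopA_nil_right]
        simp only [dif_pos hi, dif_neg hj]
        rw [hg]
    · have hp : P.drop i = [] := List.drop_eq_nil_of_le (by omega)
      rw [hp, entGoB, entLoopA_nil_left]
      simp only [dif_neg hi]
      rw [hp]

-- ===== VERDICT (by name: the statement is the Claim_ definition above) =====
theorem sentence_metrics_spec : Claim_equal_sentence_metrics := by
  intro pred_labels gs_labels _
  show _ = _
  have hconf : (pred_labels.zip gs_labels).foldl confStepB PySem.Dict.empty
      = (pred_labels.zip gs_labels).foldl confStepA PySem.Dict.empty := rfl
  have htok : (pred_labels.zip gs_labels).foldl tokStepB PySem.Dict.empty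
      = (pred_labels.zip gs_labels).foldl tokStepA PySem.Dict.empty := rfl
  have hent := entAgree (getIndicesPy pred_labels) (getIndicesPy gs_labels)
    ((getIndicesPy pred_labels).length + (getIndicesPy gs_labels).length) 0 0 PySem.Dict.empty
    (by omega)
  simp only [List.drop_zero] at hent
  simp only [sentence_metrics, sentence_metrics_alt, PySem.List.foldl_prod_mk, hconf, htok,
    hent, List.length_drop]
  rfl
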